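-- pv_equiv track=rewrite | github.com/gardonig/Anatomy_Posets | src/anatomy_poset/gui/poset_viewer.py | _matrix_summary_counts
-- ===== SOURCE A (Python) =====
-- from typing import Dict, List, Optional, Set, Tuple
--
-- def _matrix_summary_counts(M: List[List[int]]) -> Tuple[int, int, int, int]:
--     """Return counts of (+1, 0, -1, -2) entries (off-diagonal only)."""
--     yes = no = unsure = not_asked = 0
--     n = len(M)
--     for i in range(n):
--         row = M[i]
--         for j in range(min(n, len(row))):
--             if i == j:
--                 continue
--             v = row[j]
--             if v == 1:
--                 yes += 1
--             elif v == 0: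
--                 unsure += 1
--             elif v == -1:
--                 no += 1
--             else:
--                 not_asked += 1
--     return yes, unsure, no, not_asked
-- ===== SOURCE B (Python) =====
-- from typing import List, Tuple
--
-- def _matrix_summary_counts(M: List[List[int]]) -> Tuple[int, int, int, int]:
--     """Collect all off-diagonal entries (rows truncated to n columns) into one
--     flat list, then derive the four counts from it instead of branching per element."""
--     n = len(M)
--     vals = [v for i, row in enumerate(M) for j, v in enumerate(row[:n]) if j != i]
--     yes = vals.count(1)
--     unsure = vals.count(0)
--     no = vals.count(-1)
--     return yes, unsure, no, len(vals) - yes - unsure - no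
-- ===== Notes on version B (the rewrite author's own statement) =====
-- stated objective: alternative
-- what changed: B replaces A's per-element four-way if/elif branching with running accumulators by building the flat list of off-diagonal entries (rows truncated to n columns) in one comprehension and deriving the four counts afterwards via list.count and a length subtraction.
import Mathlib
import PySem

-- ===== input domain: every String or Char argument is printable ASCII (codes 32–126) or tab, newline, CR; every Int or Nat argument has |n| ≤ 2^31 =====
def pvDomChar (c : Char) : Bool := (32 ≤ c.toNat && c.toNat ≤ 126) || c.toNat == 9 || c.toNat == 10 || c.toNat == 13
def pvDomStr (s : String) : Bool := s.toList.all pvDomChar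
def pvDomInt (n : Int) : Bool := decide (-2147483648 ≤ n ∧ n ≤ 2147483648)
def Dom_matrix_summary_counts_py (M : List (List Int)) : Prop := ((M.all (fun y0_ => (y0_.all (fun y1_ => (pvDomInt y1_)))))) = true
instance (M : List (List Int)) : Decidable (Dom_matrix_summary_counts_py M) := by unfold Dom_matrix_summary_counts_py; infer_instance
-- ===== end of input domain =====

-- B flattens all off-diagonal entries (rows truncated to n columns) into one list and
-- derives the four counts from it (three counts plus a length subtraction) instead of
-- A's per-element four-way branch with running accumulators; objective: alternative.

-- ===== PORT A =====
def matrix_summary_counts_py (M : List (List Int)) : Int × Int × Int × Int :=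
  let n : Int := (M.length : Int)
  (PySem.List.pyRange 0 n 1).foldl (fun st i =>
    let row := PySem.List.pyGetD M i []
    (PySem.List.pyRange 0 (min n (row.length : Int)) 1).foldl (fun st j =>
      if i = j then st
      else
        let v := PySem.List.pyGetD row j 0
        if v = 1 then (st.1 + 1, st.2.1, st.2.2.1, st.2.2.2)
        else if v = 0 then (st.1, st.2.1 + 1, st.2.2.1, st.2.2.2)
        else if v = -1 then (st.1, st.2.1, st.2.2.1 + 1, st.2.2.2)
        else (st.1, st.2.1, st.2.2.1, st.2.2.2 + 1)) st) ((0 : Int), (0 : Int), (0 : Int), (0 : Int))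

-- ===== PORT B =====
def matrix_summary_counts_py_alt (M : List (List Int)) : Int × Int × Int × Int :=
  let n : Int := (M.length : Int)
  let vals : List Int :=
    (PySem.List.enumerate M).flatMap (fun p =>
      ((PySem.List.enumerate (PySem.List.slice p.2 none (some n))).filter
        (fun q => q.1 != p.1)).map Prod.snd)
  let yes : Int := (PySem.List.count vals 1 : Int)
  let unsure : Int := (PySem.List.count vals 0 : Int)
  let no : Int := (PySem.List.count vals (-1) : Int)
  (yes, unsure, no, (vals.length : Int) - yes - unsure - no)


-- ===== PRECONDITION & SPEC =====
def Spec_matrix_summary_counts_py (M : List (List Int)) (out : Int × Int × Int × Int) : Prop := out = matrix_summary_counts_py_alt M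
instance (M : List (List Int)) (out : Int × Int × Int × Int) : Decidable (Spec_matrix_summary_counts_py M out) := by unfold Spec_matrix_summary_counts_py; infer_instance

-- ===== CLAIM (what is proved, stated in full; the proofs are below) =====
def Claim_equal_matrix_summary_counts_py : Prop := ∀ (M : List (List Int)), Dom_matrix_summary_counts_py M → Spec_matrix_summary_counts_py M (matrix_summary_counts_py M)

-- ===== LEMMAS AND PROOFS =====

def pvUpd (st : Int × Int × Int × Int) (v : Int) : Int × Int × Int × Int :=
  if v = 1 then (st.1 + 1, st.2.1, st.2.2.1, st.2.2.2)
  else if v = 0 then (st.1, st.2.1 + 1, st.2.2.1, st.2.2.2)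
  else if v = -1 then (st.1, st.2.1, st.2.2.1 + 1, st.2.2.2)
  else (st.1, st.2.1, st.2.2.1, st.2.2.2 + 1)

def pvRowVals (i m : Nat) (row : List Int) : List Int :=
  ((List.range m).filter (fun k => !decide (i = k))).map (fun k => row.getD k 0)

def pvVals (M : List (List Int)) : List Int :=
  (List.range M.length).flatMap (fun i =>
    pvRowVals i (min M.length (M.getD i []).length) (M.getD i []))

theorem pvUpd_eq (st : Int × Int × Int × Int) (x : Int) :
    pvUpd st x = (st.1 + (if x = 1 then 1 else 0), st.2.1 + (if x = 0 then 1 else 0),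
      st.2.2.1 + (if x = -1 then 1 else 0),
      st.2.2.2 + (if x = 1 ∨ x = 0 ∨ x = -1 then 0 else 1)) := by
  unfold pvUpd; split_ifs <;> simp_all

theorem pv_count_cons (v x : Int) (vs : List Int) :
    (PySem.List.count (x :: vs) v : Int) = (PySem.List.count vs v : Int) + (if x = v then 1 else 0) := by
  simp [PySem.List.count, List.count_cons]

theorem pv_foldl_upd (vs : List Int) (y u o na : Int) :
    vs.foldl pvUpd (y, u, o, na)
      = (y + (PySem.List.count vs 1 : Int), u + (PySem.List.count vs 0 : Int),
         o + (PySem.List.count vs (-1) : Int),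
         na + ((vs.length : Int) - (PySem.List.count vs 1 : Int)
               - (PySem.List.count vs 0 : Int) - (PySem.List.count vs (-1) : Int))) := by
  induction vs generalizing y u o na with
  | nil => simp [PySem.List.count]
  | cons x vs ih =>
      rw [List.foldl_cons, pvUpd_eq, ih]
      simp only [Prod.mk.injEq, pv_count_cons, List.length_cons]
      push_cast
      refine ⟨by split_ifs <;> omega, by split_ifs <;> omega, by split_ifs <;> omega,
        by split_ifs <;> omega⟩

theorem pv_foldl_skip {σ : Type} (p : Nat → Prop) [DecidablePred p] (g : σ → Int → σ)
    (h : Nat → Int) (l : List Nat) (st : σ) :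
    l.foldl (fun st x => if p x then st else g st (h x)) st
      = ((l.filter (fun x => !decide (p x))).map h).foldl g st := by
  induction l generalizing st with
  | nil => rfl
  | cons a l ih => by_cases hp : p a <;> simp [hp, ih]

theorem pv_foldl_nested {α σ : Type} (g : σ → Int → σ) (h : α → List Int)
    (l : List α) (st : σ) :
    l.foldl (fun st x => ((h x).foldl g st : σ)) st = (l.flatMap h).foldl g st := by
  induction l generalizing st with
  | nil => rfl
  | cons a l ih => simp [List.flatMap_cons, List.foldl_append, ih]

theorem pv_enumerate_eq {α : Type} (d : α) (xs : List α) (s : Nat) :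
    PySem.List.enumerate xs (s : Int)
      = (List.range xs.length).map (fun k => (((s + k : Nat) : Int), xs.getD k d)) := by
  induction xs generalizing s with
  | nil => rfl
  | cons x xs ih =>
      show ((s : Int), x) :: PySem.List.enumerate xs ((s : Int) + 1) = _
      rw [show ((s : Int) + 1) = ((s + 1 : Nat) : Int) by push_cast; ring, ih (s + 1)]
      rw [List.length_cons, List.range_succ_eq_map, List.map_cons, List.map_map]
      congr 1
      simp
      intro a _
      omega

theorem pv_enumerate_zero {α : Type} (d : α) (xs : List α) :
    PySem.List.enumerate xs
      = (List.range xs.length).map (fun (k : Nat) => ((k : Int), xs.getD k d)) := by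
  have := pv_enumerate_eq d xs 0
  simpa using this

-- inner loop of A over one row
theorem pv_inner (i m : Nat) (row : List Int) (st : Int × Int × Int × Int) :
    (List.range m).foldl (fun st k =>
      if ((i : Nat) : Int) = ((k : Nat) : Int) then st
      else pvUpd st (row.getD k 0)) st
      = (pvRowVals i m row).foldl pvUpd st := by
  have h := pv_foldl_skip (p := fun k => ((i : Nat) : Int) = ((k : Nat) : Int)) pvUpd
    (fun k => row.getD k 0) (List.range m) st
  refine h.trans ?_
  unfold pvRowVals
  congr 2
  apply List.filter_congr
  intro k _
  simp

theorem pv_A_eq (M : List (List Int)) :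
    matrix_summary_counts_py M = (pvVals M).foldl pvUpd ((0:Int), (0:Int), (0:Int), (0:Int)) := by
  unfold matrix_summary_counts_py
  simp only [PySem.List.pyRange_zero_natCast, List.foldl_map, PySem.List.pyGetD_natCast,
    ← Nat.cast_min]
  have step : ∀ (st : Int × Int × Int × Int) (i : Nat),
      (List.range (min M.length (M.getD i []).length)).foldl (fun st k =>
        if ((i : Nat) : Int) = ((k : Nat) : Int) then st
        else pvUpd st ((M.getD i []).getD k 0)) st
      = (pvRowVals i (min M.length (M.getD i []).length) (M.getD i [])).foldl pvUpd st :=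
    fun st i => pv_inner i _ _ st
  calc (List.range M.length).foldl (fun st i =>
        (List.range (min M.length (M.getD i []).length)).foldl (fun st k =>
          if ((i : Nat) : Int) = ((k : Nat) : Int) then st
          else pvUpd st ((M.getD i []).getD k 0)) st) ((0:Int), (0:Int), (0:Int), (0:Int))
      = (List.range M.length).foldl (fun st i =>
          (pvRowVals i (min M.length (M.getD i []).length) (M.getD i [])).foldl pvUpd st)
          ((0:Int), (0:Int), (0:Int), (0:Int)) := by
        exact PySem.List.foldl_congr_mem _ _ _ _ (fun st i _ => step st i)
    _ = (pvVals M).foldl pvUpd ((0:Int), (0:Int), (0:Int), (0:Int)) := by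
        exact pv_foldl_nested pvUpd _ (List.range M.length) _

theorem pv_row_eq (i n : Nat) (row : List Int) :
    ((PySem.List.enumerate (PySem.List.slice row none (some (n : Int)))).filter
        (fun q => q.1 != ((i : Nat) : Int))).map Prod.snd
      = pvRowVals i (min n row.length) row := by
  rw [PySem.List.slice_to row (by positivity), Int.toNat_natCast, pv_enumerate_zero 0,
    List.filter_map, List.map_map, List.length_take]
  rw [show List.filter ((fun (q : Int × Int) => q.1 != ((i : Nat) : Int)) ∘
        (fun (k : Nat) => ((k : Int), (List.take n row).getD k 0))) (List.range (min n row.length))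
      = List.filter (fun k => !decide (i = k)) (List.range (min n row.length)) from
    List.filter_congr (fun k _ => by by_cases h : i = k <;> simp [Function.comp, bne, h]; omega)]
  unfold pvRowVals
  apply List.map_congr_left
  intro k hk
  have hkm : k < min n row.length := List.mem_range.mp (List.mem_of_mem_filter hk)
  have hn : k < n := lt_of_lt_of_le hkm (min_le_left _ _)
  simp [Function.comp, List.getD, hn]

theorem pv_B_eq (M : List (List Int)) :
    matrix_summary_counts_py_alt M
      = ((PySem.List.count (pvVals M) 1 : Int), (PySem.List.count (pvVals M) 0 : Int),
         (PySem.List.count (pvVals M) (-1) : Int),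
         ((pvVals M).length : Int) - (PySem.List.count (pvVals M) 1 : Int)
           - (PySem.List.count (pvVals M) 0 : Int) - (PySem.List.count (pvVals M) (-1) : Int)) := by
  unfold matrix_summary_counts_py_alt
  have hv : (PySem.List.enumerate M).flatMap (fun p =>
      ((PySem.List.enumerate (PySem.List.slice p.2 none (some (M.length : Int)))).filter
        (fun q => q.1 != p.1)).map Prod.snd) = pvVals M := by
    rw [pv_enumerate_zero [] M, List.flatMap_map]
    unfold pvVals
    apply List.flatMap_congr
    intro i hi
    exact pv_row_eq i M.length (M.getD i [])
  simp only [hv]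

theorem main_eq (M : List (List Int)) :
    matrix_summary_counts_py M = matrix_summary_counts_py_alt M := by
  rw [pv_A_eq, pv_B_eq, pv_foldl_upd]
  simp

-- ===== VERDICT (by name: the statement is the Claim_ definition above) =====
theorem matrix_summary_counts_py_spec : Claim_equal_matrix_summary_counts_py := by
  intro M _
  exact main_eq M
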